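-- pv_equiv track=rewrite | github.com/SanjeevSharma22/bizdetails-ai-final | backend/app/main.py | employee_range_from_size
-- ===== SOURCE A (Python) =====
-- from typing import Any, Dict, List, Optional
--
-- def employee_range_from_size(size: Optional[int]) -> Optional[str]:
--     """Map an exact employee count to a human-readable range."""
--     if size is None:
--         return None
--     ranges = [
--         (1, 10, "1-10"),
--         (11, 50, "11-50"),
--         (51, 200, "51-200"),
--         (201, 500, "201-500"),
--         (501, 1000, "501-1,000"),
--         (1001, 5000, "1,001-5,000"),
--         (5001, 10000, "5,001-10,000"),
--         (10001, None, "10,001+"),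
--     ]
--     for min_v, max_v, label in ranges:
--         if size >= min_v and (max_v is None or size <= max_v):
--             return label
--     return None
-- ===== SOURCE B (Python) =====
-- import bisect
--
-- _THRESHOLDS = [10, 50, 200, 500, 1000, 5000, 10000]
-- _LABELS = ["1-10", "11-50", "51-200", "201-500", "501-1,000",
--            "1,001-5,000", "5,001-10,000", "10,001+"]
--
-- def employee_range_from_size(size):
--     """Map an exact employee count to a human-readable range."""
--     if size is None or size < 1:
--         return None
--     return _LABELS[bisect.bisect_left(_THRESHOLDS, size)]
-- ===== Notes on version B (the rewrite author's own statement) =====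
-- stated objective: idiomatic
-- what changed: Replaced the linear scan over (min,max,label) triples by a binary-search bucket lookup (bisect_left) over a sorted threshold array with a parallel label list, after guarding None and size<1.
import Mathlib
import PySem

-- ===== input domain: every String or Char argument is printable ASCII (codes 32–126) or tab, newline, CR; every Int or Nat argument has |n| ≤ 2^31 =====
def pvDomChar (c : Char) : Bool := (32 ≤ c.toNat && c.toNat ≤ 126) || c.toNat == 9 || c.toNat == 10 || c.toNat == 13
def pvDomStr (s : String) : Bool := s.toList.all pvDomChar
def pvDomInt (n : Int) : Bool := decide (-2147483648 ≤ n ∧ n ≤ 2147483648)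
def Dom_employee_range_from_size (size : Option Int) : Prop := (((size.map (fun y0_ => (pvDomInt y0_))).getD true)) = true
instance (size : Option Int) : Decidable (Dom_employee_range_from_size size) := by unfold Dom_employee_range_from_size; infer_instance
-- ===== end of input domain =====

-- B replaces A's linear scan over (min,max,label) triples with a bisect_left bucket lookup (idiomatic; return value only).
-- ===== PORT A =====
-- the ranges table, literally as in A
def pvRangesA : List (Int × Option Int × String) :=
  [(1, some 10, "1-10"), (11, some 50, "11-50"), (51, some 200, "51-200"),
   (201, some 500, "201-500"), (501, some 1000, "501-1,000"),
   (1001, some 5000, "1,001-5,000"), (5001, some 10000, "5,001-10,000"),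
   (10001, none, "10,001+")]

-- the for-loop: first matching triple's label, else fall through to None
def pvScanA (size : Int) : List (Int × Option Int × String) → Option String
  | [] => none
  | (minV, maxV, label) :: rest =>
    if size ≥ minV ∧ (maxV = none ∨ (maxV.getD 0 ≥ size ∧ maxV ≠ none)) then some label
    else pvScanA size rest

def employee_range_from_size (size : Option Int) : Option String :=
  match size with
  | none => none
  | some n => pvScanA n pvRangesA

-- ===== PORT B =====
def pvThresholds : List Int := [10, 50, 200, 500, 1000, 5000, 10000]
def pvLabels : List String :=
  ["1-10", "11-50", "51-200", "201-500", "501-1,000", "1,001-5,000", "5,001-10,000", "10,001+"]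

-- bisect.bisect_left: binary search on [lo, hi); fuel bounds the iteration count
def pvBisectLeft (xs : List Int) (x : Int) : Nat :=
  pvBisectGo xs x xs.length 0 xs.length
where
  pvBisectGo (xs : List Int) (x : Int) : Nat → Nat → Nat → Nat
    | 0, lo, _ => lo
    | Nat.succ fuel, lo, hi =>
      if lo < hi then
        let mid := (lo + hi) / 2
        if xs.getD mid 0 < x then pvBisectGo xs x fuel (mid + 1) hi
        else pvBisectGo xs x fuel lo mid
      else lo

def employee_range_from_size_alt (size : Option Int) : Option String :=
  match size with
  | none => none
  | some n => if n < 1 then none else pvLabels[pvBisectLeft pvThresholds n]?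


-- ===== PRECONDITION & SPEC =====
def Spec_employee_range_from_size (size : Option Int) (out : Option String) : Prop := out = employee_range_from_size_alt size
instance (size : Option Int) (out : Option String) : Decidable (Spec_employee_range_from_size size out) := by unfold Spec_employee_range_from_size; infer_instance

-- ===== CLAIM (what is proved, stated in full; the proofs are below) =====
def Claim_equal_employee_range_from_size : Prop := ∀ (size : Option Int), Dom_employee_range_from_size size → Spec_employee_range_from_size size (employee_range_from_size size)

-- ===== LEMMAS AND PROOFS =====

-- ===== VERDICT (by name: the statement is the Claim_ definition above) =====
set_option maxHeartbeats 1600000 in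
theorem employee_range_from_size_spec : Claim_equal_employee_range_from_size := by
  intro size _
  unfold Spec_employee_range_from_size
  match size with
  | none => rfl
  | some n =>
    norm_num [employee_range_from_size, employee_range_from_size_alt, pvScanA, pvRangesA,
      pvBisectLeft, pvBisectLeft.pvBisectGo, pvThresholds, pvLabels]
    split_ifs <;> first | rfl | omega | (exfalso; simp_all; omega) | (exfalso; simp_all)
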